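-- pv_equiv track=rewrite | github.com/vishwakaria/topology-aware-launcher | code/topology_aware_launcher.py | construct_ranking
-- ===== SOURCE A (Python) =====
-- def construct_ranking(pp_degree, dp_degree, optimize_for_pp, dp_major, count, spine_to_host):
--     assert count == pp_degree * dp_degree, "pp_degree * dp_degree must match number of hosts"
--     if not dp_major:
--         pp_degree, dp_degree = dp_degree, pp_degree
--     flattened = []
--     for spine in spine_to_host:
--         for hostname in spine_to_host[spine]:
--             flattened.append(hostname)
--     if not optimize_for_pp:
--         return flattened
--     ranking = ["" for i in range(count)]
--     k = 0
--     for i in range(dp_degree):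
--         for j in range(pp_degree):
--             ranking[i + j * dp_degree] = flattened[k]
--             k += 1
--     return ranking
-- ===== SOURCE B (Python) =====
-- def construct_ranking(pp_degree, dp_degree, optimize_for_pp, dp_major, count, spine_to_host):
--     assert count == pp_degree * dp_degree, "pp_degree * dp_degree must match number of hosts"
--     if not dp_major:
--         pp_degree, dp_degree = dp_degree, pp_degree
--     flattened = [h for hosts in spine_to_host.values() for h in hosts]
--     if not optimize_for_pp:
--         return flattened
--     rows = [flattened[i * pp_degree:(i + 1) * pp_degree] for i in range(dp_degree)]
--     return [h for col in zip(*rows) for h in col]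
-- ===== Notes on version B (the rewrite author's own statement) =====
-- stated objective: idiomatic
-- what changed: B replaces A's running-counter index arithmetic (ranking[i + j*dp_degree] = flattened[k]; k += 1 over a preallocated list) by an explicit matrix view: reshape flattened into dp_degree rows of length pp_degree and flatten the transpose zip(*rows) column by column; the flatten phase iterates dict values directly instead of re-looking each key up.
-- outside the precondition, e.g. on construct_ranking(-1, -2, True, True, 2, {'s': ['a', 'b']}): A returns ['', ''], B returns []
import Mathlib
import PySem

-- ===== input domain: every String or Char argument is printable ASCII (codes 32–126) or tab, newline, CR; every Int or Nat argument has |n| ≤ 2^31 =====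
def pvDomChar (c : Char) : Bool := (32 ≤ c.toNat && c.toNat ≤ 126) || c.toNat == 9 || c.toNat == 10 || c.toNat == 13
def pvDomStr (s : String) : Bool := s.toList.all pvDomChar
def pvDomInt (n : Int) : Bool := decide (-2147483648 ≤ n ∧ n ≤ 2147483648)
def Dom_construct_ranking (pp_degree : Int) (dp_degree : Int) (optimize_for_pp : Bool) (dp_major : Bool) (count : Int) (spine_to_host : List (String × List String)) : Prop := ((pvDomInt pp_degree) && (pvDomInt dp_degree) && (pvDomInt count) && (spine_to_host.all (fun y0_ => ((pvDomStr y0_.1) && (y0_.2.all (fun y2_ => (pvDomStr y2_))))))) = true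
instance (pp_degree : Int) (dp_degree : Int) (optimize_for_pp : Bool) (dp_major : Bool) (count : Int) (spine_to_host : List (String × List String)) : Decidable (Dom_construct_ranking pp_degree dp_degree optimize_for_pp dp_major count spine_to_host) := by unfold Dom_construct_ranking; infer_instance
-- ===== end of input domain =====

-- B replaces A's running-counter index arithmetic by an explicit reshape-into-rows + transpose (zip(*rows))
-- view, and flattens the dict's values directly instead of re-looking up each key (objective: idiomatic).

-- ===== PORT A =====
-- Literal port of A.  The assert becomes the leading 'if' (AssertionError inputs are outside Pre_).
-- spine_to_host[spine] is first-match lookup (.getD [] is unreachable: the key comes from the list itself);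
-- ranking[i+j*dp] = flattened[k] uses .set (…).toNat and (pyGet? …).getD "" — under Pre_ both indices are
-- nonnegative and in range, so this is exact (Python would raise IndexError otherwise, excluded by Pre_).
def construct_ranking (pp_degree : Int) (dp_degree : Int) (optimize_for_pp : Bool) (dp_major : Bool) (count : Int) (spine_to_host : List (String × List String)) : List String :=
  if count ≠ pp_degree * dp_degree then []
  else
    let pp := if dp_major then pp_degree else dp_degree
    let dp := if dp_major then dp_degree else pp_degree
    let flattened := spine_to_host.foldl
      (fun acc kv => ((List.lookup kv.1 spine_to_host).getD []).foldl (fun a h => a ++ [h]) acc) []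
    if !optimize_for_pp then flattened
    else
      let init := (PySem.List.pyRange 0 count 1).map (fun _ => "")
      let res := (PySem.List.pyRange 0 dp 1).foldl (fun st i =>
        (PySem.List.pyRange 0 pp 1).foldl (fun st j =>
          (st.1.set (i + j * dp).toNat ((PySem.List.pyGet? flattened st.2).getD ""), st.2 + 1)) st)
        (init, (0 : Int))
      res.1

-- ===== PORT B =====
-- Port of Python's zip(*rows) (library call): columns j = 0 .. min row length - 1, column j is the j-th
-- element of every row; zip() of no iterables is empty.
def pyZipStar (rows : List (List String)) : List (List String) :=
  match rows with
  | [] => []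
  | r :: rs =>
    (List.range (rs.foldl (fun m l => min m l.length) r.length)).map
      (fun j => (r :: rs).map (fun l => l.getD j ""))

def construct_ranking_alt (pp_degree : Int) (dp_degree : Int) (optimize_for_pp : Bool) (dp_major : Bool) (count : Int) (spine_to_host : List (String × List String)) : List String :=
  if count ≠ pp_degree * dp_degree then []
  else
    let pp := if dp_major then pp_degree else dp_degree
    let dp := if dp_major then dp_degree else pp_degree
    let flattened := spine_to_host.flatMap (fun kv => kv.2)
    if !optimize_for_pp then flattened
    else
      let rows := (PySem.List.pyRange 0 dp 1).map
        (fun i => PySem.List.slice flattened (some (i * pp)) (some ((i + 1) * pp)))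
      (pyZipStar rows).flatMap (fun col => col)

-- ===== PRECONDITION & SPEC =====
-- Pre_ excludes: inputs where A raises (AssertionError when count ≠ pp*dp; IndexError when optimize_for_pp
-- and there are fewer than count hosts); negative degrees with optimize_for_pp, outside the task's natural
-- domain, where A's list of count empty strings is an accident of preallocation; and duplicate spine keys,
-- which a Python dict argument cannot hold (it collapses them), a modelling artefact of the assoc list.
def Pre_construct_ranking (pp_degree : Int) (dp_degree : Int) (optimize_for_pp : Bool) (dp_major : Bool) (count : Int) (spine_to_host : List (String × List String)) : Prop :=
  count = pp_degree * dp_degree ∧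
  (spine_to_host.map Prod.fst).Nodup ∧
  (optimize_for_pp = true → 0 ≤ pp_degree ∧ 0 ≤ dp_degree ∧
    count ≤ ((spine_to_host.flatMap (fun kv => kv.2)).length : Int))
instance (pp_degree : Int) (dp_degree : Int) (optimize_for_pp : Bool) (dp_major : Bool) (count : Int) (spine_to_host : List (String × List String)) : Decidable (Pre_construct_ranking pp_degree dp_degree optimize_for_pp dp_major count spine_to_host) := by unfold Pre_construct_ranking; infer_instance

def pvWitness_construct_ranking : Int × Int × Bool × Bool × Int × (List (String × List String)) :=
  (2, 2, true, true, 4, [("s0", ["a", "b"]), ("s1", ["c", "d"])])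

def Spec_construct_ranking (pp_degree : Int) (dp_degree : Int) (optimize_for_pp : Bool) (dp_major : Bool) (count : Int) (spine_to_host : List (String × List String)) (out : List String) : Prop := out = construct_ranking_alt pp_degree dp_degree optimize_for_pp dp_major count spine_to_host
instance (pp_degree : Int) (dp_degree : Int) (optimize_for_pp : Bool) (dp_major : Bool) (count : Int) (spine_to_host : List (String × List String)) (out : List String) : Decidable (Spec_construct_ranking pp_degree dp_degree optimize_for_pp dp_major count spine_to_host out) := by unfold Spec_construct_ranking; infer_instance

-- ===== CLAIM (what is proved, stated in full; the proofs are below) =====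
def Claim_equal_construct_ranking : Prop := ∀ (pp_degree : Int) (dp_degree : Int) (optimize_for_pp : Bool) (dp_major : Bool) (count : Int) (spine_to_host : List (String × List String)), Dom_construct_ranking pp_degree dp_degree optimize_for_pp dp_major count spine_to_host → Pre_construct_ranking pp_degree dp_degree optimize_for_pp dp_major count spine_to_host → Spec_construct_ranking pp_degree dp_degree optimize_for_pp dp_major count spine_to_host (construct_ranking pp_degree dp_degree optimize_for_pp dp_major count spine_to_host)

-- ===== LEMMAS AND PROOFS =====

theorem lookup_of_nodup {β : Type} (s : List (String × β)) (hnd : (s.map Prod.fst).Nodup) :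
    ∀ kv ∈ s, List.lookup kv.1 s = some kv.2 := by
  induction s with
  | nil => intro kv h; simp at h
  | cons hd tl ih =>
    simp only [List.map_cons, List.nodup_cons] at hnd
    intro kv hkv
    rcases List.mem_cons.1 hkv with h | h
    · subst h; simp [List.lookup]
    · have hbe : (kv.1 == hd.1) = false := by
        simp only [beq_eq_false_iff_ne, ne_eq]
        intro he
        exact hnd.1 (he ▸ List.mem_map_of_mem h)
      simp only [List.lookup, hbe]
      exact ih hnd.2 kv h


theorem flatten_eq (s : List (String × List String)) (hnd : (s.map Prod.fst).Nodup) :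
    s.foldl (fun acc kv => ((List.lookup kv.1 s).getD []).foldl (fun a h => a ++ [h]) acc) []
      = s.flatMap (fun kv => kv.2) := by
  have h1 : s.foldl (fun acc kv => ((List.lookup kv.1 s).getD []).foldl (fun a h => a ++ [h]) acc) []
      = s.foldl (fun acc kv => acc ++ (List.lookup kv.1 s).getD []) [] := by
    apply PySem.List.foldl_congr_mem
    intro acc kv _
    exact PySem.List.foldl_append_singleton_eq_self _ _
  rw [h1, PySem.List.foldl_append_eq_flatMap, List.nil_append]
  apply List.flatMap_congr
  intro kv hkv
  rw [lookup_of_nodup s hnd kv hkv]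
  rfl


theorem minfold_const (rs : List (List String)) (p : Nat) (h : ∀ l ∈ rs, l.length = p) :
    rs.foldl (fun m l => min m l.length) p = p := by
  induction rs with
  | nil => rfl
  | cons hd tl ih =>
    simp only [List.foldl_cons, h hd (List.mem_cons_self ..), min_self]
    exact ih (fun l hl => h l (List.mem_cons_of_mem _ hl))

theorem set_map_range {α : Type} (m q : Nat) (g : Nat → α) (x : α) :
    ((List.range m).map g).set q x = (List.range m).map (fun t => if t = q then x else g t) := by
  apply List.ext_getElem
  · simp
  · intro t h1 h2
    simp only [List.getElem_set, List.getElem_map, List.getElem_range]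
    split <;> split <;> first | rfl | omega

theorem flatten_transpose {α : Type} (h : Nat → Nat → α) (p n : Nat) :
    ((List.range p).map (fun j => (List.range n).map (fun k => h j k))).flatten
      = (List.range (p * n)).map (fun t => h (t / n) (t % n)) := by
  induction p with
  | zero => simp
  | succ p ih =>
    rw [List.range_succ, List.map_append, List.flatten_append, ih]
    have : (p + 1) * n = p * n + n := by ring
    rw [this, List.range_add, List.map_append]
    congr 1
    simp only [List.map_cons, List.map_nil, List.flatten_cons, List.flatten_nil,
      List.append_nil, List.map_map]
    apply List.map_congr_left
    intro r hr
    have hrn : r < n := List.mem_range.1 hr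
    have hn : 0 < n := by omega
    simp only [Function.comp_apply]
    congr 1
    · rw [Nat.mul_comm p n, Nat.mul_add_div hn, Nat.div_eq_of_lt hrn]; omega
    · rw [Nat.mul_comm p n, Nat.mul_add_mod, Nat.mod_eq_of_lt hrn]

-- the state of A's filling loop: rows 0..i-1 fully written, row i written up to column j
def pvFill (p n i j : Nat) (f : List String) : List String :=
  (List.range (p * n)).map (fun t =>
    if t % n < i ∨ (t % n = i ∧ t / n < j) then f.getD ((t % n) * p + t / n) "" else "")

theorem inner_step (p n i : Nat) (f : List String) (hi : i < n) :
    ∀ j, j ≤ p → (List.range j).foldl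
        (fun st (k : Nat) =>
          (st.1.set (((i : Int) + (k : Int) * (n : Int)).toNat)
            ((PySem.List.pyGet? f st.2).getD ""), st.2 + 1))
        (pvFill p n i 0 f, ((i * p : Nat) : Int))
      = (pvFill p n i j f, ((i * p + j : Nat) : Int)) := by
  intro j
  induction j with
  | zero => intro _; simp [pvFill]
  | succ j ihj =>
    intro hj1
    have hj : j < p := hj1
    rw [List.range_succ, List.foldl_append, ihj (by omega), List.foldl_cons, List.foldl_nil]
    have hn : 0 < n := by omega
    have hidx : (((i : Int) + (j : Int) * (n : Int)).toNat) = i + j * n := by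
      have : ((i : Int) + (j : Int) * (n : Int)) = ((i + j * n : Nat) : Int) := by push_cast; ring
      rw [this, Int.toNat_natCast]
    have hget : (PySem.List.pyGet? f ((i * p + j : Nat) : Int)).getD "" = f.getD (i * p + j) "" := by
      rw [PySem.List.pyGet?_natCast, List.getD_eq_getElem?_getD]
    simp only [hidx, hget]
    refine Prod.ext ?_ ?_
    · show (pvFill p n i j f).set (i + j * n) (f.getD (i * p + j) "") = pvFill p n i (j + 1) f
      unfold pvFill
      rw [set_map_range]
      apply List.map_congr_left
      intro t ht
      have htm : t < p * n := List.mem_range.1 ht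
      have hdm := Nat.div_add_mod t n
      have hmlt : t % n < n := Nat.mod_lt _ hn
      by_cases hq : t = i + j * n
      · subst hq
        have hm1 : (i + j * n) % n = i := by
          rw [Nat.add_mul_mod_self_right, Nat.mod_eq_of_lt hi]
        have hd1 : (i + j * n) / n = j := by
          rw [Nat.add_mul_div_right _ _ hn, Nat.div_eq_of_lt hi]; omega
        simp [hm1, hd1]
      · rw [if_neg hq]
        by_cases hab : t % n = i ∧ t / n = j
        · exfalso
          apply hq
          obtain ⟨ha, hb⟩ := hab
          rw [← hdm, ha, hb]; ring
        · apply if_congr _ rfl rfl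
          constructor
          · rintro (h1 | ⟨h2, h3⟩)
            · exact Or.inl h1
            · exact Or.inr ⟨h2, by omega⟩
          · rintro (h1 | ⟨h2, h3⟩)
            · exact Or.inl h1
            · refine Or.inr ⟨h2, ?_⟩
              rcases Nat.lt_succ_iff_lt_or_eq.1 h3 with h4 | h4
              · exact h4
              · exact absurd ⟨h2, h4⟩ hab
    · show ((i * p + j : Nat) : Int) + 1 = ((i * p + (j + 1) : Nat) : Int)
      push_cast; ring

theorem fill_row_done (p n i : Nat) (f : List String) (hn : 0 < n) :
    pvFill p n i p f = pvFill p n (i + 1) 0 f := by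
  unfold pvFill
  apply List.map_congr_left
  intro t ht
  have htm : t < p * n := List.mem_range.1 ht
  have hb : t / n < p := (Nat.div_lt_iff_lt_mul hn).2 (by omega)
  apply if_congr _ rfl rfl
  constructor
  · rintro (h1 | ⟨h2, _⟩)
    · exact Or.inl (by omega)
    · exact Or.inl (by omega)
  · rintro (h1 | ⟨_, h3⟩)
    · rcases Nat.lt_succ_iff_lt_or_eq.1 h1 with h4 | h4
      · exact Or.inl h4
      · exact Or.inr ⟨h4, hb⟩
    · exact absurd h3 (Nat.not_lt_zero _)

theorem outer_loop (p n : Nat) (f : List String) :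
    ∀ i, i ≤ n → (List.range i).foldl
        (fun st (k : Nat) => (List.range p).foldl
          (fun st (j : Nat) =>
            (st.1.set (((k : Int) + (j : Int) * (n : Int)).toNat)
              ((PySem.List.pyGet? f st.2).getD ""), st.2 + 1)) st)
        (pvFill p n 0 0 f, (0 : Int))
      = (pvFill p n i 0 f, ((i * p : Nat) : Int)) := by
  intro i
  induction i with
  | zero => intro _; simp
  | succ i ihi =>
    intro hi1
    have hi : i < n := hi1
    have hn : 0 < n := by omega
    rw [List.range_succ, List.foldl_append, ihi (by omega), List.foldl_cons, List.foldl_nil]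
    rw [inner_step p n i f hi p (le_refl p)]
    rw [fill_row_done p n i f hn]
    congr 1
    congr 1
    ring

theorem zipStar_const (rows : List (List String)) (p : Nat) (hrows : rows ≠ [])
    (h : ∀ l ∈ rows, l.length = p) :
    pyZipStar rows = (List.range p).map (fun j => rows.map (fun l => l.getD j "")) := by
  cases rows with
  | nil => exact absurd rfl hrows
  | cons r rs =>
    show (List.range (rs.foldl (fun m l => min m l.length) r.length)).map
        (fun j => (r :: rs).map (fun l => l.getD j ""))
      = (List.range p).map (fun j => (r :: rs).map (fun l => l.getD j ""))
    rw [h r (List.mem_cons_self ..), minfold_const rs p (fun l hl => h l (List.mem_cons_of_mem _ hl))]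

theorem b_closed (p n : Nat) (f : List String) (hlen : p * n ≤ f.length) :
    (pyZipStar ((PySem.List.pyRange 0 (n : Int) 1).map
        (fun i => PySem.List.slice f (some (i * (p : Int))) (some ((i + 1) * (p : Int)))))).flatMap
        (fun col => col)
      = (List.range (p * n)).map (fun t => f.getD ((t % n) * p + t / n) "") := by
  rw [PySem.List.pyRange_zero_natCast, List.map_map]
  have hrw : (List.range n).map ((fun i => PySem.List.slice f (some (i * (p : Int)))
      (some ((i + 1) * (p : Int)))) ∘ (fun k : Nat => (k : Int)))
      = (List.range n).map (fun k : Nat => (f.drop (k * p)).take p) := by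
    apply List.map_congr_left
    intro k _
    simp only [Function.comp_apply]
    have h1 : ((k : Int) * (p : Int)) = ((k * p : Nat) : Int) := by push_cast; ring
    have h2 : (((k : Int) + 1) * (p : Int)) = ((k * p : Nat) : Int) + ((p : Nat) : Int) := by
      push_cast; ring
    rw [h1, h2, PySem.List.slice_natCast_add]
  rw [hrw]
  cases n with
  | zero => simp [pyZipStar]
  | succ m =>
    have hlen' : ∀ l ∈ (List.range (m + 1)).map (fun k : Nat => (f.drop (k * p)).take p),
        l.length = p := by
      intro l hl
      obtain ⟨k, hk, rfl⟩ := List.mem_map.1 hl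
      have hk' : k < m + 1 := List.mem_range.1 hk
      simp only [List.length_take, List.length_drop]
      have : k * p + p ≤ p * (m + 1) := by
        have h3 : (k + 1) * p ≤ (m + 1) * p := Nat.mul_le_mul_right p hk'
        calc k * p + p = (k + 1) * p := by ring
        _ ≤ (m + 1) * p := h3
        _ = p * (m + 1) := by ring
      omega
    rw [zipStar_const _ p (by simp) hlen']
    have hmap : ∀ j ∈ List.range p,
        ((List.range (m + 1)).map (fun k : Nat => (f.drop (k * p)).take p)).map
          (fun l => l.getD j "")
        = (List.range (m + 1)).map (fun k => f.getD (k * p + j) "") := by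
      intro j hj
      have hjp : j < p := List.mem_range.1 hj
      rw [List.map_map]
      apply List.map_congr_left
      intro k _
      simp only [Function.comp_apply, List.getD_eq_getElem?_getD, List.getElem?_take,
        List.getElem?_drop]
      simp [hjp]
    have : ((List.range p).map (fun j =>
        ((List.range (m + 1)).map (fun k : Nat => (f.drop (k * p)).take p)).map
          (fun l => l.getD j ""))).flatMap (fun col => col)
        = ((List.range p).map (fun j =>
            (List.range (m + 1)).map (fun k => f.getD (k * p + j) ""))).flatMap
            (fun col => col) := by
      congr 1
      exact List.map_congr_left hmap
    rw [this]
    have hfm : ∀ (L : List (List String)), L.flatMap (fun col => col) = L.flatten := by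
      intro L; simp [List.flatMap_def]
    rw [hfm, flatten_transpose (fun j k => f.getD (k * p + j) "") p (m + 1)]

theorem fill_full (p n : Nat) (f : List String) :
    pvFill p n n 0 f = (List.range (p * n)).map (fun t => f.getD ((t % n) * p + t / n) "") := by
  unfold pvFill
  apply List.map_congr_left
  intro t ht
  have htm : t < p * n := List.mem_range.1 ht
  have hn : 0 < n := by
    rcases Nat.eq_zero_or_pos n with h | h
    · subst h; omega
    · exact h
  rw [if_pos (Or.inl (Nat.mod_lt t hn))]

theorem main_core (p n : Nat) (f : List String) (hlen : p * n ≤ f.length) :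
    ((PySem.List.pyRange 0 (n : Int) 1).foldl (fun st i =>
        (PySem.List.pyRange 0 (p : Int) 1).foldl (fun st j =>
          (st.1.set (i + j * (n : Int)).toNat ((PySem.List.pyGet? f st.2).getD ""), st.2 + 1)) st)
      ((PySem.List.pyRange 0 ((p : Int) * (n : Int)) 1).map (fun _ => ""), (0 : Int))).1
    = (pyZipStar ((PySem.List.pyRange 0 (n : Int) 1).map
        (fun i => PySem.List.slice f (some (i * (p : Int))) (some ((i + 1) * (p : Int)))))).flatMap
        (fun col => col) := by
  rw [b_closed p n f hlen]
  have hc : ((p : Int) * (n : Int)) = ((p * n : Nat) : Int) := by push_cast; ring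
  rw [hc]
  simp only [PySem.List.pyRange_zero_natCast, List.foldl_map]
  have hinit : ((List.range (p * n)).map (fun k : Nat => (k : Int))).map
      (fun _ => ("" : String)) = pvFill p n 0 0 f := by
    unfold pvFill
    rw [List.map_map]
    apply List.map_congr_left
    intro t _
    simp
  rw [hinit, outer_loop p n f n (le_refl n), ← fill_full p n f]

theorem branch_true (pp dp count : Int) (s : List (String × List String))
    (hpp : 0 ≤ pp) (hdp : 0 ≤ dp) (hc : count = pp * dp)
    (hle : count ≤ ((s.flatMap (fun kv => kv.2)).length : Int)) :
    ((PySem.List.pyRange 0 dp 1).foldl (fun st i =>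
        (PySem.List.pyRange 0 pp 1).foldl (fun st j =>
          (st.1.set (i + j * dp).toNat
            ((PySem.List.pyGet? (s.flatMap (fun kv => kv.2)) st.2).getD ""), st.2 + 1)) st)
      ((PySem.List.pyRange 0 count 1).map (fun _ => ""), (0 : Int))).1
    = (pyZipStar ((PySem.List.pyRange 0 dp 1).map
        (fun i => PySem.List.slice (s.flatMap (fun kv => kv.2))
          (some (i * pp)) (some ((i + 1) * pp))))).flatMap (fun col => col) := by
  obtain ⟨pn, rfl⟩ : ∃ pn : Nat, pp = (pn : Int) := ⟨pp.toNat, (Int.toNat_of_nonneg hpp).symm⟩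
  obtain ⟨dn, rfl⟩ : ∃ dn : Nat, dp = (dn : Int) := ⟨dp.toNat, (Int.toNat_of_nonneg hdp).symm⟩
  subst hc
  have hlen : pn * dn ≤ (s.flatMap (fun kv => kv.2)).length := by exact_mod_cast hle
  have h := main_core pn dn (s.flatMap (fun kv => kv.2)) hlen
  convert h using 2

-- ===== VERDICT (by name: the statement is the Claim_ definition above) =====
theorem construct_ranking_spec : Claim_equal_construct_ranking := by
  intro pp_degree dp_degree optimize_for_pp dp_major count spine_to_host _hdom hpre
  obtain ⟨hc, hnd, hopt⟩ := hpre
  unfold Spec_construct_ranking construct_ranking construct_ranking_alt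
  rw [if_neg (show ¬ count ≠ pp_degree * dp_degree from fun h => h hc)]
  rw [if_neg (show ¬ count ≠ pp_degree * dp_degree from fun h => h hc)]
  cases dp_major <;> cases optimize_for_pp <;>
    simp only [Bool.not_true, Bool.not_false, if_true, if_false, Bool.false_eq_true]
  · exact flatten_eq spine_to_host hnd
  · obtain ⟨hpp, hdp, hle⟩ := hopt rfl
    rw [flatten_eq spine_to_host hnd]
    exact branch_true dp_degree pp_degree count spine_to_host hdp hpp (by rw [hc]; ring) hle
  · exact flatten_eq spine_to_host hnd
  · obtain ⟨hpp, hdp, hle⟩ := hopt rfl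
    rw [flatten_eq spine_to_host hnd]
    exact branch_true pp_degree dp_degree count spine_to_host hpp hdp hc hle
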